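-- pv_equiv track=rewrite | github.com/Repair-Lab/claw-in-the-shell | bridge/migration_runner.py | _strip_transaction_wrappers
-- ===== SOURCE A (Python) =====
-- def _strip_transaction_wrappers(sql: str) -> str:
--     """Entfernt BEGIN/COMMIT Wrapper, da wir die Transaktion
--     selbst steuern."""
--     # Entferne alleinstehende BEGIN; und COMMIT; Zeilen
--     lines = sql.split("\n")
--     cleaned = []
--     for line in lines:
--         stripped = line.strip().upper()
--         if stripped in ("BEGIN;", "COMMIT;", "BEGIN", "COMMIT"):
--             continue
--         cleaned.append(line)
--     return "\n".join(cleaned)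
-- ===== SOURCE B (Python) =====
-- def _flush(cur, out, first):
--     line = "".join(cur)
--     if line.strip().upper() in {"BEGIN", "COMMIT", "BEGIN;", "COMMIT;"}:
--         return first
--     if not first:
--         out.append("\n")
--     out.append(line)
--     return False
--
--
-- def _strip_transaction_wrappers(sql: str) -> str:
--     """Entfernt BEGIN/COMMIT Wrapper: single fused character pass,
--     no intermediate line list."""
--     out = []
--     cur = []
--     first = True
--     for ch in sql:
--         if ch == "\n":
--             first = _flush(cur, out, first)
--             cur = []
--         else:
--             cur.append(ch)
--     _flush(cur, out, first)
--     return "".join(out)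
-- ===== Notes on version B (the rewrite author's own statement) =====
-- stated objective: alternative
-- what changed: replaced split-into-line-list / filter loop / join with a single fused character-level pass that keeps a current-line buffer and a first-kept-line flag and emits surviving lines with their separating newlines on the fly
import Mathlib
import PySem

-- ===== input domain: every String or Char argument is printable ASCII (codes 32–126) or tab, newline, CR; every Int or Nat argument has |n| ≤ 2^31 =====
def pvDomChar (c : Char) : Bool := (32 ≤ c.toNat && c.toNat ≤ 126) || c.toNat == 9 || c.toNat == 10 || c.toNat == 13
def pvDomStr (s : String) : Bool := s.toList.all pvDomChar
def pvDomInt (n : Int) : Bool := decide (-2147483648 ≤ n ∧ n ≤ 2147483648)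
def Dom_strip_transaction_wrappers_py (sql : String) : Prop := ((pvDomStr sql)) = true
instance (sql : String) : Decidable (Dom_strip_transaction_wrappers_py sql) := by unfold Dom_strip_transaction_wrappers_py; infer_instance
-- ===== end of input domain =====

-- B replaces A's split/filter-loop/join with one fused character pass over the string (same cost; alternative structure).
-- String operations are ported on the List Char side (PySem.Chars), exact per the PySem convention.

-- ===== PORT A =====
-- line.strip().upper() in ("BEGIN;", "COMMIT;", "BEGIN", "COMMIT")
def pvWrapA (line : List Char) : Bool :=
  let stripped := PySem.Chars.upper (PySem.Chars.strip line)
  decide (stripped = "BEGIN;".toList ∨ stripped = "COMMIT;".toList ∨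
          stripped = "BEGIN".toList ∨ stripped = "COMMIT".toList)

def strip_transaction_wrappers_py (sql : String) : String :=
  let lines := PySem.Chars.splitOn sql.toList "\n".toList
  let cleaned := lines.foldl
    (fun acc line => if pvWrapA line then acc else acc ++ [line]) ([] : List (List Char))
  String.ofList (PySem.Chars.join "\n".toList cleaned)

-- ===== PORT B =====
-- line.strip().upper() in {"BEGIN", "COMMIT", "BEGIN;", "COMMIT;"}
def pvWrapB (line : List Char) : Bool :=
  decide (PySem.Chars.upper (PySem.Chars.strip line) ∈
    ["BEGIN".toList, "COMMIT".toList, "BEGIN;".toList, "COMMIT;".toList])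

-- _flush(cur, out, first): returns (new out, new first) (out is returned functionally)
def pvFlushB (cur out : List Char) (first : Bool) : List Char × Bool :=
  if pvWrapB cur then (out, first)
  else if first then (out ++ cur, false)
  else (out ++ '\n' :: cur, false)

-- the for-loop over the characters of sql, then the final flush
def pvGoB : List Char → List Char → List Char → Bool → List Char
  | [], cur, out, first => (pvFlushB cur out first).1
  | c :: rest, cur, out, first =>
    if c = '\n' then
      let p := pvFlushB cur out first
      pvGoB rest [] p.1 p.2
    else
      pvGoB rest (cur ++ [c]) out first

def strip_transaction_wrappers_py_alt (sql : String) : String :=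
  String.ofList (pvGoB sql.toList [] [] true)

-- ===== PRECONDITION & SPEC =====
def Spec_strip_transaction_wrappers_py (sql : String) (out : String) : Prop := out = strip_transaction_wrappers_py_alt sql
instance (sql : String) (out : String) : Decidable (Spec_strip_transaction_wrappers_py sql out) := by unfold Spec_strip_transaction_wrappers_py; infer_instance

-- ===== CLAIM (what is proved, stated in full; the proofs are below) =====
def Claim_equal_strip_transaction_wrappers_py : Prop := ∀ (sql : String), Dom_strip_transaction_wrappers_py sql → Spec_strip_transaction_wrappers_py sql (strip_transaction_wrappers_py sql)

-- ===== LEMMAS AND PROOFS =====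

-- simple functional model of s.split("\n")
def pvSplitNL : List Char → List (List Char)
  | [] => [[]]
  | c :: rest =>
    if c = '\n' then [] :: pvSplitNL rest
    else
      match pvSplitNL rest with
      | [] => [[c]]
      | h :: t => (c :: h) :: t

def pvConsHd (pre : List Char) : List (List Char) → List (List Char)
  | [] => [pre]
  | h :: t => (pre ++ h) :: t

def pvTailJoin (parts : List (List Char)) : List Char :=
  parts.flatMap (fun p => '\n' :: p)

theorem pvSplitNL_ne_nil (l : List Char) : pvSplitNL l ≠ [] := by
  cases l with
  | nil => simp [pvSplitNL]
  | cons c rest =>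
    simp only [pvSplitNL]
    split <;> try simp
    split <;> simp

theorem pvConsHd_nil_eq (parts : List (List Char)) (h : parts ≠ []) :
    pvConsHd [] parts = parts := by
  cases parts with
  | nil => exact absurd rfl h
  | cons a t => simp [pvConsHd]

theorem pvWrapA_eq_pvWrapB (line : List Char) : pvWrapA line = pvWrapB line := by
  unfold pvWrapA pvWrapB
  rw [decide_eq_decide]
  simp only [List.mem_cons, List.not_mem_nil, or_false]
  tauto

theorem pvSplitOn_go_eq (l : List Char) : ∀ (fuel : Nat) (cur : List Char) (acc : List (List Char)),
    l.length < fuel →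
    PySem.Chars.splitOn.go ['\n'] fuel l cur acc = acc.reverse ++ pvConsHd cur.reverse (pvSplitNL l) := by
  induction l with
  | nil =>
    intro fuel cur acc h
    cases fuel with
    | zero => omega
    | succ f =>
      simp [PySem.Chars.splitOn.go, pvSplitNL, pvConsHd]
  | cons c rest ih =>
    intro fuel cur acc h
    cases fuel with
    | zero => simp at h
    | succ f =>
      rw [PySem.Chars.splitOn.go]
      by_cases hc : c = '\n'
      · subst hc
        have hpre : List.isPrefixOf ['\n'] ('\n' :: rest) = true := by
          simp [List.isPrefixOf]
        simp only [hpre, if_true, List.length_cons, List.drop_succ_cons, List.length_nil, List.drop_zero]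
        rw [ih f [] (cur.reverse :: acc) (by simpa using Nat.lt_of_succ_lt_succ h)]
        rw [List.reverse_nil, pvConsHd_nil_eq _ (pvSplitNL_ne_nil rest)]
        simp [pvSplitNL, pvConsHd]
      · have hpre : List.isPrefixOf ['\n'] (c :: rest) = false := by
          simp [List.isPrefixOf]
          intro h'; exact absurd h'.symm hc
        simp only [hpre, Bool.false_eq_true, if_false]
        rw [ih f (c :: cur) acc (by simpa using Nat.lt_of_succ_lt_succ h)]
        obtain ⟨hh, ht, hrest⟩ : ∃ hh ht, pvSplitNL rest = hh :: ht := by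
          cases hsp : pvSplitNL rest with
          | nil => exact absurd hsp (pvSplitNL_ne_nil rest)
          | cons a t => exact ⟨a, t, rfl⟩
        simp [pvSplitNL, hc, hrest, pvConsHd]

theorem pvSplitOn_eq (s : List Char) :
    PySem.Chars.splitOn s ['\n'] = pvSplitNL s := by
  rw [PySem.Chars.splitOn, pvSplitOn_go_eq s (s.length + 1) [] [] (by omega)]
  simp [pvConsHd_nil_eq _ (pvSplitNL_ne_nil s)]

theorem pvJoinNL_cons (h : List Char) (t : List (List Char)) :
    PySem.Chars.join ['\n'] (h :: t) = h ++ pvTailJoin t := by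
  induction t generalizing h with
  | nil => simp [PySem.Chars.join, List.intercalate, pvTailJoin]
  | cons b t' ih =>
    rw [PySem.Chars.join_cons_cons, ih b]
    simp [pvTailJoin]

theorem pvGoB_eq (cs : List Char) : ∀ (cur out : List Char) (first : Bool),
    pvGoB cs cur out first =
      out ++ (if first then PySem.Chars.join ['\n'] else pvTailJoin)
        ((pvConsHd cur (pvSplitNL cs)).filter (fun l => !pvWrapB l)) := by
  induction cs with
  | nil =>
    intro cur out first
    simp only [pvGoB, pvFlushB, pvSplitNL, pvConsHd, List.append_nil]
    by_cases hw : pvWrapB cur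
    · simp [hw]
      cases first <;> simp [PySem.Chars.join, List.intercalate, pvTailJoin]
    · cases first <;>
        simp [hw, pvJoinNL_cons, pvTailJoin]
  | cons c rest ih =>
    intro cur out first
    by_cases hc : c = '\n'
    · subst hc
      simp only [pvGoB, if_pos rfl]
      rw [ih]
      rw [pvConsHd_nil_eq _ (pvSplitNL_ne_nil rest)]
      simp only [pvSplitNL, if_pos rfl]
      by_cases hw : pvWrapB cur
      · simp [pvFlushB, hw, pvConsHd, List.filter]
      · cases first <;>
          simp [pvFlushB, hw, pvConsHd, pvJoinNL_cons, pvTailJoin]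
    · obtain ⟨hh, ht, hrest⟩ : ∃ hh ht, pvSplitNL rest = hh :: ht := by
        cases hsp : pvSplitNL rest with
        | nil => exact absurd hsp (pvSplitNL_ne_nil rest)
        | cons a t => exact ⟨a, t, rfl⟩
      simp only [pvGoB, if_neg hc]
      rw [ih]
      simp [pvSplitNL, hc, hrest, pvConsHd]

-- ===== VERDICT (by name: the statement is the Claim_ definition above) =====
theorem strip_transaction_wrappers_py_spec : Claim_equal_strip_transaction_wrappers_py := by
  intro sql _
  unfold Spec_strip_transaction_wrappers_py strip_transaction_wrappers_py strip_transaction_wrappers_py_alt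
  show String.ofList (PySem.Chars.join ['\n']
      ((PySem.Chars.splitOn sql.toList ['\n']).foldl
        (fun acc line => if pvWrapA line then acc else acc ++ [line]) [])) =
    String.ofList (pvGoB sql.toList [] [] true)
  have hstep : (fun (acc : List (List Char)) (line : List Char) =>
      if pvWrapA line then acc else acc ++ [line]) =
      (fun acc line => if (!pvWrapB line) = true then acc ++ [id line] else acc) := by
    funext acc line
    rw [pvWrapA_eq_pvWrapB]
    by_cases h : pvWrapB line <;> simp [h]
  rw [pvSplitOn_eq, pvGoB_eq, hstep, PySem.List.foldl_append_if,
    pvConsHd_nil_eq _ (pvSplitNL_ne_nil sql.toList)]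
  simp
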